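-- pv_equiv track=rewrite | github.com/womri1998/ProjectEuler100s | problem145.py | reversible
-- ===== SOURCE A (Python) =====
-- def reverse(n):
--     return int(str(n)[::-1])
--
-- def reversible(n):
--     if n % 10 == 0:
--         return False
--     m = str(n + reverse(n))
--     for c in m:
--         if int(c) % 2 == 0:
--             return False
--     return True
-- ===== SOURCE B (Python) =====
-- def reversible(n):
--     if n % 10 == 0:
--         return False
--     a = n
--     r = int(str(n)[::-1])
--     carry = 0
--     while a > 0 or r > 0:
--         s = a % 10 + r % 10 + carry
--         if s % 2 == 0:
--             return False
--         carry = s // 10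
--         a //= 10
--         r //= 10
--     return carry == 0 or carry % 2 == 1
-- ===== Notes on version B (the rewrite author's own statement) =====
-- stated objective: alternative
-- what changed: B never computes n + reverse(n) nor stringifies it: it performs columnwise addition of n and the reversed value with a running carry, testing each column digit's parity on the fly (early exit) and checking the final carry-out digit; the last-digit-zero guard and the string-based reverse helper are kept.
import Mathlib
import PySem

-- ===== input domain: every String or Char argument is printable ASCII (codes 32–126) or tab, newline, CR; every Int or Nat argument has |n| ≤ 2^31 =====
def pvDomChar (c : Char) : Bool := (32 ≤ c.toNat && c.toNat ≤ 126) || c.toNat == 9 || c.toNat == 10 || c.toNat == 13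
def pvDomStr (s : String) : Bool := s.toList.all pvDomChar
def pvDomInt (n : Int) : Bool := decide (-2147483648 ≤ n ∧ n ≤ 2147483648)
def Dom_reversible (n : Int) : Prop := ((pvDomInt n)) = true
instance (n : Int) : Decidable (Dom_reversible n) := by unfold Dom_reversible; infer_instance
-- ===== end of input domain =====

-- B replaces computing the sum and scanning its string digits by columnwise digit addition
-- of n and the reversed value with a running carry (early exit per even column digit);
-- the guard and the string-based reverse helper are kept.

-- ===== PORT A =====
-- helper 'reverse': int(str(n)[::-1]); none = ValueError (excluded by Pre_)
def pyReverse? (n : Int) : Option Int :=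
  PySem.Int.ofChars? ((PySem.Chars.slice? (PySem.Int.toChars n) none none (-1)).getD [])

-- 'for c in m: if int(c) % 2 == 0: return False' then 'return True'
def pvCheckChars : List Char → Bool
  | [] => true
  | c :: cs =>
      if PySem.Int.mod ((PySem.Int.ofChars? [c]).getD 0) 2 == 0 then false
      else pvCheckChars cs

def reversible (n : Int) : Bool :=
  if PySem.Int.mod n 10 == 0 then false
  else pvCheckChars (PySem.Int.toChars (n + (pyReverse? n).getD 0))

-- ===== PORT B =====
-- 'while a > 0 or r > 0: s = a%10 + r%10 + carry; if s % 2 == 0: return False;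
--  carry = s//10; a //= 10; r //= 10' then 'return carry == 0 or carry % 2 == 1'
def pvColLoop (a r carry : Int) : Bool :=
  if _h : 0 < a ∨ 0 < r then
    let s := PySem.Int.mod a 10 + PySem.Int.mod r 10 + carry
    if PySem.Int.mod s 2 == 0 then false
    else pvColLoop (PySem.Int.floordiv a 10) (PySem.Int.floordiv r 10) (PySem.Int.floordiv s 10)
  else carry == 0 || PySem.Int.mod carry 2 == 1
termination_by a.toNat + r.toNat
decreasing_by
  simp only [PySem.Int.floordiv_eq_ediv_of_pos (by norm_num : (0:Int) < 10)]
  omega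

def reversible_alt (n : Int) : Bool :=
  if PySem.Int.mod n 10 == 0 then false
  else pvColLoop n ((pyReverse? n).getD 0) 0

-- ===== PRECONDITION & SPEC =====
-- Pre_ excludes exactly the inputs where Python A raises ValueError: negative n whose last
-- decimal digit is nonzero (the reversed string ends with the sign, so int() fails; B's int()
-- raises there too). A returns on every input admitted here.
def Pre_reversible (n : Int) : Prop := 0 ≤ n ∨ PySem.Int.mod n 10 = 0
instance (n : Int) : Decidable (Pre_reversible n) := by unfold Pre_reversible; infer_instance
def pvWitness_reversible : Int := (23)

def Spec_reversible (n : Int) (out : Bool) : Prop := out = reversible_alt n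
instance (n : Int) (out : Bool) : Decidable (Spec_reversible n out) := by unfold Spec_reversible; infer_instance

-- ===== CLAIM (what is proved, stated in full; the proofs are below) =====
def Claim_equal_reversible : Prop := ∀ (n : Int), Dom_reversible n → Pre_reversible n → Spec_reversible n (reversible n)

-- ===== LEMMAS AND PROOFS =====

-- Nat.toDigitsCore with enough fuel produces base-10 digits, most significant first
lemma pv_toDigitsCore_eq : ∀ (fuel n : Nat) (ds : List Char), 0 < n → n ≤ fuel →
    Nat.toDigitsCore 10 fuel n ds = ((Nat.digits 10 n).map Nat.digitChar).reverse ++ ds := by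
  intro fuel
  induction fuel with
  | zero => intro n ds h1 h2; omega
  | succ f ih =>
    intro n ds h1 h2
    rw [Nat.toDigitsCore]
    by_cases hq : n / 10 = 0
    · rw [if_pos hq]
      rw [Nat.digits_def' (by norm_num) h1]
      have h0 : Nat.digits 10 (n / 10) = [] := by rw [hq]; simp
      rw [h0]
      simp
    · rw [if_neg hq]
      rw [ih (n / 10) _ (by omega) (by omega)]
      rw [Nat.digits_def' (by norm_num) h1]
      simp

lemma pv_toDigits_eq (k : Nat) (hk : 0 < k) :
    Nat.toDigits 10 k = ((Nat.digits 10 k).map Nat.digitChar).reverse := by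
  rw [Nat.toDigits, pv_toDigitsCore_eq (k+1) k [] hk (by omega)]
  simp

lemma pv_digit_pred (d : Nat) (hd : d < 10) :
    (!(PySem.Int.mod ((PySem.Int.ofChars? [Nat.digitChar d]).getD 0) 2 == 0)) = decide (d % 2 = 1) := by
  interval_cases d <;> decide

lemma pv_no_dash (k : Nat) : '-' ∉ Nat.toDigits 10 k := by
  rcases Nat.eq_zero_or_pos k with h | h
  · subst h; decide
  · rw [pv_toDigits_eq k h]
    intro hmem
    simp only [List.mem_reverse, List.mem_map] at hmem
    obtain ⟨d, hd, hc⟩ := hmem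
    have : d < 10 := Nat.digits_lt_base (by norm_num) hd
    interval_cases d <;> exact absurd hc (by decide)

lemma pv_all_mem_congr (l : List Nat) (p q : Nat → Bool) (h : ∀ d ∈ l, p d = q d) :
    l.all p = l.all q := by
  induction l with
  | nil => rfl
  | cons a t ih =>
    rw [List.all_cons, List.all_cons, h a (by simp), ih (fun d hd => h d (by simp [hd]))]

lemma pv_checkChars_eq_all (l : List Char) :
    pvCheckChars l = l.all (fun c => !(PySem.Int.mod ((PySem.Int.ofChars? [c]).getD 0) 2 == 0)) := by
  induction l with
  | nil => rfl
  | cons c cs ih =>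
    rw [pvCheckChars, List.all_cons, ih]
    by_cases h : (PySem.Int.mod ((PySem.Int.ofChars? [c]).getD 0) 2 == 0) = true
    · rw [if_pos h, h]; rfl
    · rw [if_neg h]
      rw [Bool.not_eq_true] at h
      rw [h]; rfl

-- A's digit-character scan of str(k) is the all-digits-odd test on Nat.digits
lemma pv_A_side (k : Nat) (hk : 0 < k) :
    pvCheckChars (PySem.Int.toChars (k : Int)) = (Nat.digits 10 k).all (fun d => decide (d % 2 = 1)) := by
  have h1 : PySem.Int.toChars (k : Int) = Nat.toDigits 10 k := by
    simp [PySem.Int.toChars]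
  rw [h1, pv_toDigits_eq k hk, pv_checkChars_eq_all, List.all_reverse, List.all_map]
  exact pv_all_mem_congr _ _ _ (fun d hd => pv_digit_pred d (Nat.digits_lt_base (by norm_num) hd))

-- B's column-addition loop computes the all-digits-odd test of x + y + c
lemma pv_B_side_aux : ∀ (s x y c : Nat), x + y = s → c ≤ 1 →
    pvColLoop (x : Int) (y : Int) (c : Int) = (Nat.digits 10 (x + y + c)).all (fun d => decide (d % 2 = 1)) := by
  intro s
  induction s using Nat.strong_induction_on with
  | _ s ih =>
    intro x y c hs hc
    rw [pvColLoop]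
    by_cases hxy : 0 < (x : Int) ∨ 0 < (y : Int)
    · rw [dif_pos hxy]
      have hx9 : x % 10 < 10 := Nat.mod_lt _ (by norm_num)
      have hy9 : y % 10 < 10 := Nat.mod_lt _ (by norm_num)
      have hmx : PySem.Int.mod (x : Int) 10 = ((x % 10 : Nat) : Int) := by
        exact_mod_cast PySem.Int.mod_natCast x 10
      have hmy : PySem.Int.mod (y : Int) 10 = ((y % 10 : Nat) : Int) := by
        exact_mod_cast PySem.Int.mod_natCast y 10
      have hcol : PySem.Int.mod (x : Int) 10 + PySem.Int.mod (y : Int) 10 + (c : Int)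
          = ((x % 10 + y % 10 + c : Nat) : Int) := by
        rw [hmx, hmy]; push_cast; ring
      have hm2 : PySem.Int.mod (((x % 10 + y % 10 + c : Nat) : Int)) 2
          = (((x % 10 + y % 10 + c) % 2 : Nat) : Int) := by
        exact_mod_cast PySem.Int.mod_natCast (x % 10 + y % 10 + c) 2
      have hfx : PySem.Int.floordiv (x : Int) 10 = ((x / 10 : Nat) : Int) := by
        exact_mod_cast PySem.Int.floordiv_natCast x 10
      have hfy : PySem.Int.floordiv (y : Int) 10 = ((y / 10 : Nat) : Int) := by
        exact_mod_cast PySem.Int.floordiv_natCast y 10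
      have hfs : PySem.Int.floordiv (((x % 10 + y % 10 + c : Nat) : Int)) 10
          = (((x % 10 + y % 10 + c) / 10 : Nat) : Int) := by
        exact_mod_cast PySem.Int.floordiv_natCast (x % 10 + y % 10 + c) 10
      have hS0 : 0 < x + y + c := by
        rcases hxy with h | h <;> [skip; skip] <;> omega
      have hdig : Nat.digits 10 (x + y + c)
          = (x + y + c) % 10 :: Nat.digits 10 ((x + y + c) / 10) :=
        Nat.digits_def' (by norm_num) hS0
      by_cases hev : (x % 10 + y % 10 + c) % 2 = 0
      · rw [if_pos]
        · rw [hdig, List.all_cons]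
          have : decide ((x + y + c) % 10 % 2 = 1) = false := by
            simp only [decide_eq_false_iff_not]
            omega
          rw [this, Bool.false_and]
        · simp only [hcol, hm2, beq_iff_eq]
          exact_mod_cast hev
      · rw [if_neg]
        · rw [hcol, hfs, hfx, hfy]
          have hrec := ih (x / 10 + y / 10) (by omega) (x / 10) (y / 10)
            ((x % 10 + y % 10 + c) / 10) rfl (by omega)
          rw [hrec, hdig, List.all_cons]
          have hhead : decide ((x + y + c) % 10 % 2 = 1) = true := by
            simp only [decide_eq_true_eq]
            omega
          have htail : x / 10 + y / 10 + (x % 10 + y % 10 + c) / 10 = (x + y + c) / 10 := by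
            omega
          rw [hhead, htail, Bool.true_and]
        · simp only [hcol, hm2, beq_iff_eq]
          intro hcontra
          exact hev (by exact_mod_cast hcontra)
    · rw [dif_neg hxy]
      have hx0 : x = 0 := by omega
      have hy0 : y = 0 := by omega
      subst hx0; subst hy0
      interval_cases c <;> decide

lemma pv_B_side (x y c : Nat) (hc : c ≤ 1) :
    pvColLoop (x : Int) (y : Int) (c : Int) = (Nat.digits 10 (x + y + c)).all (fun d => decide (d % 2 = 1)) :=
  pv_B_side_aux (x + y) x y c rfl hc

-- int() of a character list without '-' never returns a negative value
lemma pv_parse_nonneg (cs : List Char) (v : Int) (hm : '-' ∉ cs)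
    (h : PySem.Int.ofChars? cs = some v) : 0 ≤ v := by
  rw [PySem.Int.ofChars?] at h
  split at h
  · rename_i ds heq
    exfalso
    apply hm
    have h1 : '-' ∈ (List.dropWhile PySem.Int.isIntSpace (List.dropWhile PySem.Int.isIntSpace cs).reverse).reverse := by
      rw [heq]; exact List.mem_cons_self
    rw [List.mem_reverse] at h1
    have h2 := (List.dropWhile_sublist (l := (List.dropWhile PySem.Int.isIntSpace cs).reverse) (p := PySem.Int.isIntSpace)).mem h1
    rw [List.mem_reverse] at h2
    exact (List.dropWhile_sublist (l := cs) (p := PySem.Int.isIntSpace)).mem h2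
  · rename_i ds heq
    simp only [Option.pure_def, Option.bind_eq_bind, Option.map_eq_some_iff, Option.bind_eq_some_iff] at h
    obtain ⟨a, ⟨b, hb, hba⟩, hav⟩ := h
    subst hav
    cases hba
    positivity
  · rename_i heq h2
    simp only [Option.pure_def, Option.bind_eq_bind, Option.map_eq_some_iff, Option.bind_eq_some_iff] at h
    obtain ⟨a, ⟨b, hb, hba⟩, hav⟩ := h
    subst hav
    cases hba
    positivity

-- on n ≥ 0, int(str(n)[::-1]) (defaulted on none) is nonnegative
lemma pv_reverse_nonneg (n : Int) (hn : 0 ≤ n) : 0 ≤ (pyReverse? n).getD 0 := by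
  have hslice : (PySem.Chars.slice? (PySem.Int.toChars n) none none (-1)).getD []
      = (PySem.Int.toChars n).reverse := by
    rw [PySem.Chars.slice?_eq_listSlice?, PySem.List.slice?_none_none_neg_one]
    rfl
  have hchars : PySem.Int.toChars n = Nat.toDigits 10 n.toNat := by
    rw [PySem.Int.toChars, if_neg (by omega)]
  have hnd : '-' ∉ (PySem.Int.toChars n).reverse := by
    rw [List.mem_reverse, hchars]
    exact pv_no_dash n.toNat
  rw [pyReverse?, hslice]
  cases hp : PySem.Int.ofChars? (PySem.Int.toChars n).reverse with
  | none => simp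
  | some v =>
    simp only [Option.getD_some]
    exact pv_parse_nonneg _ v hnd hp

-- ===== VERDICT (by name: the statement is the Claim_ definition above) =====
theorem reversible_spec : Claim_equal_reversible := by
  intro n _ hpre
  unfold Spec_reversible reversible reversible_alt
  by_cases h10 : (PySem.Int.mod n 10 == 0) = true
  · rw [if_pos h10, if_pos h10]
  · rw [if_neg h10, if_neg h10]
    have hn0 : 0 ≤ n := by
      rcases hpre with h | h
      · exact h
      · exact absurd (by rw [h]; rfl) h10
    have hn1 : 1 ≤ n := by
      rcases lt_or_eq_of_le hn0 with h | h
      · omega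
      · exact absurd (by rw [← h]; decide) h10
    have hr : 0 ≤ (pyReverse? n).getD 0 := pv_reverse_nonneg n hn0
    set r : Int := (pyReverse? n).getD 0 with hrdef
    have hmk : n + r = (((n + r).toNat : Nat) : Int) := by omega
    have hsplit : (n + r).toNat = n.toNat + r.toNat := by omega
    have hA : pvCheckChars (PySem.Int.toChars (n + r))
        = (Nat.digits 10 ((n + r).toNat)).all (fun d => decide (d % 2 = 1)) := by
      rw [hmk]; exact pv_A_side (n + r).toNat (by omega)
    have hB : pvColLoop n r 0
        = (Nat.digits 10 (n.toNat + r.toNat + 0)).all (fun d => decide (d % 2 = 1)) := by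
      have := pv_B_side n.toNat r.toNat 0 (by omega)
      simpa [Int.toNat_of_nonneg hn0, Int.toNat_of_nonneg hr] using this
    rw [hA, hB, hsplit, Nat.add_zero]
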